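-- pv_equiv track=rewrite | github.com/InnoVoxAI/docuparser | docuparse-project/backend-ocr/infrastructure/engines/openrouter_engine.py | _remove_loop_repetitions
-- ===== SOURCE A (Python) =====
-- def _remove_loop_repetitions(text: str, min_phrase: int = 15) -> str:
--     """Truncate text at the first looping repetition (≥3 exact consecutive occurrences)."""
--     if not text or len(text) < min_phrase * 3:
--         return text
--     n = len(text)
--     for phrase_len in range(min_phrase, n // 3 + 1):
--         i = 0
--         while i + phrase_len * 3 <= n:
--             phrase = text[i:i + phrase_len]
--             if (text[i + phrase_len:i + phrase_len * 2] == phrase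
--                     and text[i + phrase_len * 2:i + phrase_len * 3] == phrase):
--                 return text[:i + phrase_len].rstrip(', \n')
--             i += 1
--     return text
-- ===== SOURCE B (Python) =====
-- def _remove_loop_repetitions(text: str, min_phrase: int = 15) -> str:
--     """Truncate text at the first looping repetition (>=3 exact consecutive occurrences).
--
--     One pass per phrase length: keep a running count of consecutive positions j with
--     text[j] == text[j + L]; a run of 2*L such matches ending at j means the phrase
--     text[i:i+L] (i = j + 1 - 2*L) occurs three times in a row starting at i.
--     """
--     if not text or len(text) < min_phrase * 3:
--         return text
--     n = len(text)
--     for L in range(max(min_phrase, 1), n // 3 + 1):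
--         cnt = 0
--         for j in range(n - L):
--             if text[j] == text[j + L]:
--                 cnt += 1
--                 if cnt >= 2 * L:
--                     return text[:j + 1 - L].rstrip(', \n')
--             else:
--                 cnt = 0
--     return text
-- ===== Notes on version B (the rewrite author's own statement) =====
-- stated objective: alternative
-- what changed: Instead of comparing three length-L slices for every start i, B does for each phrase length L one left-to-right scan with a running count of consecutive positions j where text[j]==text[j+L]; the first run of 2L matches pinpoints the first triple repetition.
-- outside the precondition, e.g. on _remove_loop_repetitions('abcdef', 0): A returns '', B returns 'abcdef'; on _remove_loop_repetitions('abcdef', -2): A returns 'abcd', B returns 'abcdef'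
import Mathlib
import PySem

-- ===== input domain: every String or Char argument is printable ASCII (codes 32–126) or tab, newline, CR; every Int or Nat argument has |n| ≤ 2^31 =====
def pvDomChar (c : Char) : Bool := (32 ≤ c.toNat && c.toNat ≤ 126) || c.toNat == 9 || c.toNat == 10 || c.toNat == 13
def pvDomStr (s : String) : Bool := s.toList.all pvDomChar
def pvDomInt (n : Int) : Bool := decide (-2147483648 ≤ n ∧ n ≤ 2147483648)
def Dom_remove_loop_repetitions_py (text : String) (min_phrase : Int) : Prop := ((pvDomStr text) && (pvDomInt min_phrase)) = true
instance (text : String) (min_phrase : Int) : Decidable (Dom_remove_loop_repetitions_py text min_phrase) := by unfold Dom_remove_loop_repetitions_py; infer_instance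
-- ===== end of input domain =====

-- B replaces A's per-start triple slice comparison by, per phrase length, one scan with a
-- running count of consecutive char matches at offset L (objective: alternative algorithm).

-- shared helper: Python's  text[:t].rstrip(', \n')  (both sources contain this exact expression;
-- PySem has no rstrip-with-chars, so the rstrip is hand-ported: drop trailing ',', ' ', '\n' — exact)
def pvRstrip (cs : List Char) : List Char :=
  (cs.reverse.dropWhile (fun c => c == ',' || c == ' ' || c == '\n')).reverse

def pvCut (text : String) (t : Int) : String :=
  String.ofList (pvRstrip (PySem.List.slice text.toList none (some t)))

-- ===== PORT A =====
-- the inner 'while i + phrase_len * 3 <= n' loop; it runs while i ≤ n - 3*phrase_len,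
-- so fuel n + |3*phrase_len| + 1 covers every iteration Python performs, for every phrase_len
def aInner (s : List Char) (L : Int) (i : Int) : Nat → Option Int
  | 0 => none
  | fuel + 1 =>
    if i + L * 3 ≤ PySem.List.len s then
      if (PySem.List.slice s (some (i + L)) (some (i + L * 2)) == PySem.List.slice s (some i) (some (i + L)))
          && (PySem.List.slice s (some (i + L * 2)) (some (i + L * 3)) == PySem.List.slice s (some i) (some (i + L))) then
        some (i + L)          -- Python returns text[:i + phrase_len].rstrip(', \n') here
      else aInner s L (i + 1) fuel
    else none

-- the 'for phrase_len in range(min_phrase, n // 3 + 1)' loop, iterated lazily as Python's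
-- range object is (the loop body runs per value; the range is never materialized)
def aOuter (s : List Char) (L hi : Int) : Option Int :=
  if _h : L < hi then
    match aInner s L 0 (s.length + 1 + (L * 3).natAbs) with
    | some t => some t
    | none => aOuter s (L + 1) hi
  else none
termination_by (hi - L).toNat
decreasing_by omega

def remove_loop_repetitions_py (text : String) (min_phrase : Int) : String :=
  if text.toList.length = 0 ∨ PySem.List.len text.toList < min_phrase * 3 then text
  else
    match aOuter text.toList min_phrase (PySem.Int.floordiv (PySem.List.len text.toList) 3 + 1) with
    | some t => pvCut text t
    | none => text

-- ===== PORT B =====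
-- the 'for j in range(n - L)' scan with running count cnt of consecutive matches at offset L
def bInner (s : List Char) (L : Int) : List Int → Int → Option Int
  | [], _ => none
  | j :: js, cnt =>
    if PySem.List.pyGet? s j == PySem.List.pyGet? s (j + L) then
      if 2 * L ≤ cnt + 1 then some (j + 1 - L)   -- Python returns text[:j + 1 - L].rstrip(', \n')
      else bInner s L js (cnt + 1)
    else bInner s L js 0

-- the 'for L in range(max(min_phrase, 1), n // 3 + 1)' loop
def bOuter (s : List Char) : List Int → Option Int
  | [] => none
  | L :: Ls =>
    match bInner s L (PySem.List.pyRange 0 (PySem.List.len s - L) 1) 0 with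
    | some t => some t
    | none => bOuter s Ls

def remove_loop_repetitions_py_alt (text : String) (min_phrase : Int) : String :=
  if text.toList.length = 0 ∨ PySem.List.len text.toList < min_phrase * 3 then text
  else
    match bOuter text.toList
        (PySem.List.pyRange (max min_phrase 1) (PySem.Int.floordiv (PySem.List.len text.toList) 3 + 1) 1) with
    | some t => pvCut text t
    | none => text

-- ===== PRECONDITION & SPEC =====
-- Pre_ restricts to the natural domain min_phrase ≥ 1: for min_phrase ≤ 0 A's empty/negative
-- phrase slices compare equal immediately and A truncates the text at an accidental position,
-- while B simply finds no repetition of positive length and returns the text unchanged.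
def Pre_remove_loop_repetitions_py (text : String) (min_phrase : Int) : Prop := 1 ≤ min_phrase
instance (text : String) (min_phrase : Int) : Decidable (Pre_remove_loop_repetitions_py text min_phrase) := by
  unfold Pre_remove_loop_repetitions_py; infer_instance

def pvWitness_remove_loop_repetitions_py : String × Int := ("abcabcabcd", 3)

def Spec_remove_loop_repetitions_py (text : String) (min_phrase : Int) (out : String) : Prop := out = remove_loop_repetitions_py_alt text min_phrase
instance (text : String) (min_phrase : Int) (out : String) : Decidable (Spec_remove_loop_repetitions_py text min_phrase out) := by unfold Spec_remove_loop_repetitions_py; infer_instance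

-- ===== CLAIM (what is proved, stated in full; the proofs are below) =====
def Claim_equal_remove_loop_repetitions_py : Prop := ∀ (text : String) (min_phrase : Int), Dom_remove_loop_repetitions_py text min_phrase → Pre_remove_loop_repetitions_py text min_phrase → Spec_remove_loop_repetitions_py text min_phrase (remove_loop_repetitions_py text min_phrase)

-- ===== LEMMAS AND PROOFS =====

-- the window test: positions i, i+1, …, i+2L-1 all match their offset-L partner
def pvW (s : List Char) (L : Nat) (i : Nat) : Bool :=
  (List.range (2 * L)).all (fun k => s[i + k]? == s[i + k + L]?)

-- reference: first i ≥ start with i + 3L ≤ n whose window matches (the value both inner loops compute)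
def pvFind (s : List Char) (L : Nat) (i : Nat) : Option Nat :=
  if h : i + 3 * L ≤ s.length ∧ 1 ≤ L then
    if pvW s L i then some i else pvFind s L (i + 1)
  else none
termination_by s.length - i
decreasing_by omega

lemma pvW_iff (s : List Char) (L i : Nat) :
    pvW s L i = true ↔ ∀ k < 2 * L, s[i + k]? = s[i + k + L]? := by
  simp [pvW]

lemma pvFind_eq_some_of (s : List Char) (L : Nat) (i i' : Nat) (hle : i ≤ i')
    (h3 : i' + 3 * L ≤ s.length) (hL : 1 ≤ L) (hW : pvW s L i' = true)
    (hmin : ∀ m, i ≤ m → m < i' → pvW s L m ≠ true) : pvFind s L i = some i' := by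
  have key : ∀ d i, i' - i ≤ d → i ≤ i' →
      (∀ m, i ≤ m → m < i' → pvW s L m ≠ true) → pvFind s L i = some i' := by
    intro d
    induction d with
    | zero =>
      intro i hd hle2 hmin2
      have : i = i' := by omega
      subst this
      rw [pvFind, dif_pos ⟨h3, hL⟩, if_pos hW]
    | succ d ih =>
      intro i hd hle2 hmin2
      by_cases he : i = i'
      · subst he; rw [pvFind, dif_pos ⟨h3, hL⟩, if_pos hW]
      · have hlt : i < i' := by omega
        rw [pvFind, dif_pos ⟨by omega, hL⟩, if_neg (hmin2 i le_rfl hlt)]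
        exact ih (i + 1) (by omega) (by omega) (fun m h1 h2 => hmin2 m (by omega) h2)
  exact key (i' - i) i le_rfl hle hmin

lemma pvFind_eq_none_of (s : List Char) (L : Nat) (i : Nat)
    (h : ∀ m, i ≤ m → m + 3 * L ≤ s.length → pvW s L m ≠ true) : pvFind s L i = none := by
  have key : ∀ d i, s.length - i ≤ d →
      (∀ m, i ≤ m → m + 3 * L ≤ s.length → pvW s L m ≠ true) → pvFind s L i = none := by
    intro d
    induction d with
    | zero =>
      intro i hd h2
      rw [pvFind, dif_neg]
      rintro ⟨hg, hL⟩; omega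
    | succ d ih =>
      intro i hd h2
      by_cases hg : i + 3 * L ≤ s.length ∧ 1 ≤ L
      · rw [pvFind, dif_pos hg, if_neg (h2 i le_rfl hg.1)]
        exact ih (i + 1) (by omega) (fun m h1 hm => h2 m (by omega) hm)
      · rw [pvFind, dif_neg hg]
  exact key s.length i (by omega) h

-- two take/drop segments agree iff they agree pointwise
lemma take_drop_eq_iff (s : List Char) (Lq a b : Nat) :
    (s.drop a).take Lq = (s.drop b).take Lq ↔ ∀ k < Lq, s[a + k]? = s[b + k]? := by
  constructor
  · intro h k hk
    have := congrArg (fun l => l[k]?) h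
    simpa [List.getElem?_take, List.getElem?_drop, hk, Nat.add_comm] using this
  · intro h
    apply List.ext_getElem?
    intro k
    by_cases hk : k < Lq
    · simpa [List.getElem?_drop, hk, Nat.add_comm] using h k hk
    · simp [hk]

-- A's triple-slice test equals the window test
lemma aCond_iff (s : List Char) (L i : Nat) :
    ((PySem.List.slice s (some ((i : Int) + L)) (some ((i : Int) + L * 2)) == PySem.List.slice s (some (i : Int)) (some ((i : Int) + L)))
      && (PySem.List.slice s (some ((i : Int) + L * 2)) (some ((i : Int) + L * 3)) == PySem.List.slice s (some (i : Int)) (some ((i : Int) + L)))) = true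
    ↔ pvW s L i = true := by
  have e1 : ((i : Int) + L) = ((i + L : Nat) : Int) := by push_cast; ring
  have e2 : ((i : Int) + L * 2) = ((i + L * 2 : Nat) : Int) := by push_cast; ring
  have e3 : ((i : Int) + L * 3) = ((i + L * 3 : Nat) : Int) := by push_cast; ring
  rw [e1, e2, e3, PySem.List.slice_natCast, PySem.List.slice_natCast, PySem.List.slice_natCast]
  have d1 : i + L * 2 - (i + L) = L := by omega
  have d2 : i + L - i = L := by omega
  have d3 : i + L * 3 - (i + L * 2) = L := by omega
  rw [d1, d2, d3, Bool.and_eq_true, beq_iff_eq, beq_iff_eq, take_drop_eq_iff, take_drop_eq_iff, pvW_iff]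
  constructor
  · rintro ⟨hA, hB⟩ k hk
    by_cases hkL : k < L
    · have h := hA k hkL
      rw [show i + L + k = i + k + L from by omega] at h
      exact h.symm
    · have hk' : k - L < L := by omega
      have h1 := hA (k - L) hk'
      have h2 := hB (k - L) hk'
      rw [show i + L + (k - L) = i + k from by omega] at h1
      rw [show i + L * 2 + (k - L) = i + k + L from by omega] at h2
      rw [h1, h2]
  · intro hW
    refine ⟨fun k hk => ?_, fun k hk => ?_⟩
    · have h := hW k (by omega)
      rw [show i + k + L = i + L + k from by omega] at h
      exact h.symm
    · have h1 := hW k (by omega)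
      have h2 := hW (k + L) (by omega)
      have h2' : s[i + k + L]? = s[i + L * 2 + k]? := by
        rw [show i + k + L = i + (k + L) from by omega, show i + L * 2 + k = i + (k + L) + L from by omega]; exact h2
      rw [← h2', ← h1]

lemma aInner_eq (s : List Char) (L : Nat) (hL : 1 ≤ L) :
    ∀ (fuel i : Nat), s.length + 1 ≤ fuel + i →
      aInner s (L : Int) (i : Int) fuel = (pvFind s L i).map (fun i' : Nat => (i' : Int) + L) := by
  intro fuel
  induction fuel with
  | zero =>
    intro i hf
    rw [show aInner s (L : Int) (i : Int) 0 = none from rfl, pvFind, dif_neg (by omega)]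
    rfl
  | succ fuel ih =>
    intro i hf
    show (if (i : Int) + L * 3 ≤ PySem.List.len s then _ else _) = _
    by_cases hg : i + 3 * L ≤ s.length
    · rw [if_pos (by simp [PySem.List.len_eq]; push_cast; omega)]
      by_cases hc : pvW s L i = true
      · rw [if_pos ((aCond_iff s L i).mpr hc), pvFind, dif_pos ⟨hg, hL⟩, if_pos hc]
        rfl
      · rw [if_neg (fun hct => hc ((aCond_iff s L i).mp hct)),
          pvFind, dif_pos ⟨hg, hL⟩, if_neg hc,
          show ((i : Nat) : Int) + 1 = (((i + 1 : Nat)) : Int) from by push_cast; ring]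
        exact ih (i + 1) (by omega)
    · rw [if_neg (by simp [PySem.List.len_eq]; push_cast; omega), pvFind, dif_neg (by omega)]
      rfl

lemma bInner_eq (s : List Char) (L : Nat) (hL : 1 ≤ L) (h3 : 3 * L ≤ s.length) :
    ∀ (d j0 c : Nat), s.length - L - j0 ≤ d →
      c ≤ j0 → c + 1 ≤ 2 * L →
      (∀ m, j0 - c ≤ m → m < j0 → s[m]? = s[m + L]?) →
      (c = j0 ∨ ¬ (s[j0 - c - 1]? = s[j0 - c - 1 + L]?)) →
      (∀ i, i + 2 * L ≤ j0 → pvW s L i ≠ true) →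
      bInner s (L : Int) (PySem.List.pyRange (j0 : Int) ((s.length : Int) - L) 1) (c : Int)
        = (pvFind s L 0).map (fun i' : Nat => (i' : Int) + L) := by
  intro d
  induction d with
  | zero =>
    intro j0 c hd h1 h2 hrun hmax hnw
    rw [PySem.List.pyRange_one_eq_nil (by omega),
      pvFind_eq_none_of s L 0 (fun m _ hm => hnw m (by omega))]
    rfl
  | succ d ih =>
    intro j0 c hd h1 h2 hrun hmax hnw
    by_cases hend : s.length - L ≤ j0
    · rw [PySem.List.pyRange_one_eq_nil (by omega),
        pvFind_eq_none_of s L 0 (fun m _ hm => hnw m (by omega))]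
      rfl
    · rw [PySem.List.pyRange_one_cons (by omega)]
      simp only [bInner]
      rw [show ((j0 : Int) + L) = ((j0 + L : Nat) : Int) from by push_cast; ring,
        PySem.List.pyGet?_natCast, PySem.List.pyGet?_natCast]
      by_cases hm : s[j0]? = s[j0 + L]?
      · rw [if_pos (by simpa using hm)]
        by_cases hfire : 2 * L ≤ c + 1
        · have hc1 : c + 1 = 2 * L := by omega
          rw [if_pos (by omega)]
          have hj0 : 2 * L ≤ j0 + 1 := by omega
          have hW0 : pvW s L (j0 + 1 - 2 * L) = true := by
            rw [pvW_iff]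
            intro k hk
            by_cases hkend : j0 + 1 - 2 * L + k = j0
            · rw [hkend]
              exact hm
            · exact hrun _ (by omega) (by omega)
          have hfind : pvFind s L 0 = some (j0 + 1 - 2 * L) :=
            pvFind_eq_some_of s L 0 _ (Nat.zero_le _) (by omega) hL hW0
              (fun m _ hmlt => hnw m (by omega))
          rw [hfind]
          simp only [Option.map_some]
          exact congrArg some (by omega)
        · rw [if_neg (by omega),
            show ((j0 : Int) + 1) = ((j0 + 1 : Nat) : Int) from by push_cast; ring,
            show ((c : Int) + 1) = ((c + 1 : Nat) : Int) from by push_cast; ring]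
          apply ih (j0 + 1) (c + 1) (by omega) (by omega) (by omega)
          · intro m hm1 hm2
            by_cases hmj : m = j0
            · subst hmj; exact hm
            · exact hrun m (by omega) (by omega)
          · rcases hmax with hcc | hnm
            · left; omega
            · right; rw [show j0 + 1 - (c + 1) - 1 = j0 - c - 1 from by omega]; exact hnm
          · intro i hi
            by_cases hij : i + 2 * L ≤ j0
            · exact hnw i hij
            · have hieq : i + 2 * L = j0 + 1 := by omega
              intro hWi
              rw [pvW_iff] at hWi
              by_cases hcj : c = j0
              · omega
              · rcases hmax with hcc | hnm
                · exact absurd hcc hcj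
                · apply hnm
                  have hk := hWi (j0 - c - 1 - i) (by omega)
                  rw [show i + (j0 - c - 1 - i) = j0 - c - 1 from by omega] at hk
                  exact hk
      · rw [if_neg (by simpa using hm),
          show ((j0 : Int) + 1) = ((j0 + 1 : Nat) : Int) from by push_cast; ring,
          show (0 : Int) = ((0 : Nat) : Int) from rfl]
        apply ih (j0 + 1) 0 (by omega) (by omega) (by omega)
        · intro m hm1 hm2; omega
        · right; rw [show j0 + 1 - 0 - 1 = j0 from by omega]; exact hm
        · intro i hi
          by_cases hij : i + 2 * L ≤ j0
          · exact hnw i hij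
          · have hieq : i + 2 * L = j0 + 1 := by omega
            intro hWi
            rw [pvW_iff] at hWi
            apply hm
            have hk := hWi (2 * L - 1) (by omega)
            rw [show i + (2 * L - 1) = j0 from by omega] at hk
            exact hk

lemma perL (s : List Char) (L : Nat) (hL : 1 ≤ L) (h3 : 3 * L ≤ s.length) :
    aInner s (L : Int) 0 (s.length + 1 + ((L : Int) * 3).natAbs)
      = bInner s (L : Int) (PySem.List.pyRange 0 ((s.length : Int) - L) 1) 0 := by
  have hA := aInner_eq s L hL (s.length + 1 + ((L : Int) * 3).natAbs) 0 (by omega)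
  have hB := bInner_eq s L hL h3 s.length 0 0 (by omega) le_rfl (by omega)
    (by intro m h1 h2; exact absurd h2 (by omega))
    (Or.inl rfl)
    (by intro i hi; exact absurd hi (by omega))
  simp only [Nat.cast_zero] at hA hB
  rw [hA, hB]

lemma outer_eq (s : List Char) :
    ∀ (d : Nat) (lo hi : Int), (hi - lo).toNat ≤ d →
      (∀ M : Int, lo ≤ M → M < hi → 1 ≤ M ∧ M * 3 ≤ (s.length : Int)) →
      aOuter s lo hi = bOuter s (PySem.List.pyRange lo hi 1) := by
  intro d
  induction d with
  | zero =>
    intro lo hi hd hmem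
    rw [aOuter, dif_neg (by omega), PySem.List.pyRange_one_eq_nil (by omega)]
    rfl
  | succ d ih =>
    intro lo hi hd hmem
    by_cases hlt : lo < hi
    · obtain ⟨hL1, hL3⟩ := hmem lo le_rfl hlt
      have hLnat : lo = ((lo.toNat : Nat) : Int) := by omega
      have h1 : 1 ≤ lo.toNat := by omega
      have h3' : 3 * lo.toNat ≤ s.length := by omega
      rw [aOuter, dif_pos hlt, PySem.List.pyRange_one_cons hlt]
      simp only [bOuter, PySem.List.len_eq]
      rw [hLnat, perL s lo.toNat h1 h3']
      cases hbi : bInner s ((lo.toNat : Nat) : Int) (PySem.List.pyRange 0 ((s.length : Int) - (lo.toNat : Nat)) 1) 0 with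
      | some t => rfl
      | none =>
        show aOuter s (((lo.toNat : Nat) : Int) + 1) hi
          = bOuter s (PySem.List.pyRange (((lo.toNat : Nat) : Int) + 1) hi 1)
        rw [show ((lo.toNat : Nat) : Int) + 1 = lo + 1 from by omega]
        exact ih (lo + 1) hi (by omega) (fun M hM1 hM2 => hmem M (by omega) hM2)
    · rw [aOuter, dif_neg hlt, PySem.List.pyRange_one_eq_nil (by omega)]
      rfl

-- ===== VERDICT (by name: the statement is the Claim_ definition above) =====
theorem remove_loop_repetitions_py_spec : Claim_equal_remove_loop_repetitions_py := by
  intro text min_phrase hdom hpre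
  have hp : 1 ≤ min_phrase := hpre
  show remove_loop_repetitions_py text min_phrase = remove_loop_repetitions_py_alt text min_phrase
  unfold remove_loop_repetitions_py remove_loop_repetitions_py_alt
  rw [max_eq_left hp]
  by_cases hC : text.toList.length = 0 ∨ PySem.List.len text.toList < min_phrase * 3
  · rw [if_pos hC, if_pos hC]
  · rw [if_neg hC, if_neg hC]
    rw [outer_eq text.toList
      (PySem.Int.floordiv (PySem.List.len text.toList) 3 + 1 - min_phrase).toNat
      min_phrase (PySem.Int.floordiv (PySem.List.len text.toList) 3 + 1) le_rfl ?hmem]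
    case hmem =>
      intro M ha hb
      refine ⟨by omega, ?_⟩
      have hb' : M ≤ PySem.Int.floordiv (PySem.List.len text.toList) 3 := by omega
      rw [← PySem.Int.le_floordiv_iff_mul_le (by omega)]
      simpa [PySem.List.len_eq] using hb'
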